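-- pv_equiv track=rewrite | github.com/bujiie/adventofcode2020 | day10/pt2.py | has_changes_outside_bounds
-- ===== SOURCE A (Python) =====
-- def remove_occurrences_in_list(lst, find):
--     return list(filter(lambda n: n != find, lst))
--
-- def has_changes_outside_bounds(lst, allowed=[]):
--     changes = []
--     for i, entity in enumerate(lst):
--         next_i = i+1
--         if next_i >= len(lst):
--             break
--         change = lst[next_i] - entity
--         changes.append(change)
--
--     for a in allowed:
--         changes = remove_occurrences_in_list(changes, a)
--     return len(changes) > 0
-- ===== SOURCE B (Python) =====
-- def has_changes_outside_bounds(lst, allowed=[]):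
--     diffs = {b - a for a, b in zip(lst, lst[1:])}
--     return bool(diffs - set(allowed))
-- ===== Notes on version B (the rewrite author's own statement) =====
-- stated objective: simpler
-- what changed: Replaces the index loop building a diffs list plus an outer loop repeatedly filtering it per allowed value with a one-line set comprehension of consecutive differences and a single set difference.
import Mathlib
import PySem

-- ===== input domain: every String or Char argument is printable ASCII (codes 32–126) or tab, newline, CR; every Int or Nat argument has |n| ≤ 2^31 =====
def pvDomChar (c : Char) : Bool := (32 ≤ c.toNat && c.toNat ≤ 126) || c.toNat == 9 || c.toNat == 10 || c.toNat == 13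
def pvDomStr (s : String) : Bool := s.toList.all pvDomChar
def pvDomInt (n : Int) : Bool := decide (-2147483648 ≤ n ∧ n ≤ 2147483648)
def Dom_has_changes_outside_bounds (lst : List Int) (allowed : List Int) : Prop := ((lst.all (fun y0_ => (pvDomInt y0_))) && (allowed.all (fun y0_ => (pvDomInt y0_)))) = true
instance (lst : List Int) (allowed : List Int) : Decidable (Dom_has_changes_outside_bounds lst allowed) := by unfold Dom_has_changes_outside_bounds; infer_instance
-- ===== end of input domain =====

-- B replaces A's diffs-list construction and its per-allowed repeated filtering by a
-- set comprehension of consecutive differences and one set difference (objective: simpler).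

-- ===== PORT A =====
def removeOccurrencesInList (lst : List Int) (find : Int) : List Int :=
  lst.filter (fun n => n != find)

-- the 'for i, entity in enumerate(lst)' loop with its break and append
def hcLoop (lst : List Int) : List (Int × Int) → List Int → List Int
  | [], changes => changes
  | (i, entity) :: rest, changes =>
    if i + 1 ≥ (lst.length : Int) then changes
    else
      -- lst[next_i]: in range here since the guard failed (exact)
      hcLoop lst rest (changes ++ [PySem.List.pyGetD lst (i + 1) 0 - entity])

def has_changes_outside_bounds (lst : List Int) (allowed : List Int) : Bool :=
  let changes := hcLoop lst (PySem.List.enumerate lst 0) []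
  let changes := allowed.foldl (fun cs a => removeOccurrencesInList cs a) changes
  decide (changes.length > 0)

-- ===== PORT B =====
def has_changes_outside_bounds_alt (lst : List Int) (allowed : List Int) : Bool :=
  let diffs : PySem.Set Int :=
    PySem.Set.ofList ((lst.zip (PySem.List.slice lst (some 1) none)).map (fun p => p.2 - p.1))
  decide (PySem.Set.diff diffs (PySem.Set.ofList allowed) ≠ ([] : List Int))

-- ===== PRECONDITION & SPEC =====
def Spec_has_changes_outside_bounds (lst : List Int) (allowed : List Int) (out : Bool) : Prop := out = has_changes_outside_bounds_alt lst allowed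
instance (lst : List Int) (allowed : List Int) (out : Bool) : Decidable (Spec_has_changes_outside_bounds lst allowed out) := by unfold Spec_has_changes_outside_bounds; infer_instance

-- ===== CLAIM (what is proved, stated in full; the proofs are below) =====
def Claim_equal_has_changes_outside_bounds : Prop := ∀ (lst : List Int) (allowed : List Int), Dom_has_changes_outside_bounds lst allowed → Spec_has_changes_outside_bounds lst allowed (has_changes_outside_bounds lst allowed)

-- ===== LEMMAS AND PROOFS =====

-- A's index loop over a suffix builds exactly the consecutive differences of that suffix.
theorem hcLoop_eq (lst : List Int) : ∀ (sub : List Int) (k : Nat) (acc : List Int),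
    lst.drop k = sub →
    hcLoop lst (PySem.List.enumerate sub (k : Int)) acc
      = acc ++ (sub.zip sub.tail).map (fun p => p.2 - p.1) := by
  intro sub
  induction sub with
  | nil => intro k acc _; simp [hcLoop, PySem.List.enumerate_nil]
  | cons x rest ih =>
    intro k acc hdrop
    have hk : k < lst.length := by
      by_contra h
      simp [List.drop_eq_nil_of_le (Nat.le_of_not_lt h)] at hdrop
    have hrest : lst.drop (k + 1) = rest := by
      have := congrArg List.tail hdrop
      simpa [List.tail_drop] using this
    have hlen : lst.length = k + 1 + rest.length := by
      have := congrArg List.length hdrop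
      simp at this
      omega
    rw [PySem.List.enumerate_cons]
    cases rest with
    | nil =>
      have hge : ((k : Int) + 1 ≥ (lst.length : Int)) := by
        rw [hlen]; simp
      simp [hcLoop, hge]
    | cons y rest' =>
      have hguard : ¬ ((k : Int) + 1 ≥ (lst.length : Int)) := by
        rw [hlen]
        have : (0:Nat) < (y :: rest').length := by simp
        push_cast at this ⊢
        omega
      have hget : PySem.List.pyGetD lst ((k : Int) + 1) 0 = y := by
        have : PySem.List.pyGetD lst ((k + 1 : Nat) : Int) 0 = lst.getD (k+1) 0 :=
          PySem.List.pyGetD_natCast lst (k+1) 0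
        have hg : lst.getD (k+1) 0 = y := by
          have : lst[k+1]? = some y := by
            rw [← Nat.add_zero (k+1), ← List.getElem?_drop, hrest]; rfl
          simp [List.getD, this]
        push_cast at this
        rw [this, hg]
      simp only [hcLoop, if_neg hguard, hget]
      have := ih (k + 1) (acc ++ [y - x]) hrest
      push_cast at this
      rw [this]
      simp [List.zip]

-- the 'for a in allowed' loop of repeated filters = one filter by 'not in allowed'
theorem foldl_remove_eq_filter : ∀ (allowed cs : List Int),
    allowed.foldl (fun cs a => removeOccurrencesInList cs a) cs
      = cs.filter (fun n => allowed.all (fun a => n != a)) := by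
  intro allowed
  induction allowed with
  | nil => intro cs; simp [List.filter_true]
  | cons a rest ih =>
    intro cs
    rw [List.foldl_cons, ih]
    simp only [removeOccurrencesInList, List.filter_filter]
    apply List.filter_congr
    intro x _
    simp [List.all_cons, Bool.and_comm]

theorem has_changes_outside_bounds_eq (lst allowed : List Int) :
    has_changes_outside_bounds lst allowed = has_changes_outside_bounds_alt lst allowed := by
  have hloop := hcLoop_eq lst lst 0 [] (by simp)
  simp only [Int.natCast_zero] at hloop
  simp only [has_changes_outside_bounds, has_changes_outside_bounds_alt, hloop,
    foldl_remove_eq_filter, PySem.List.slice_from_one, List.nil_append]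
  set ds := (lst.zip lst.tail).map (fun p => p.2 - p.1) with hds
  rw [decide_eq_decide]
  constructor
  · intro h
    rcases List.exists_mem_of_length_pos h with ⟨c, hc⟩
    rw [List.mem_filter] at hc
    obtain ⟨hcm, hcall⟩ := hc
    intro hdiff
    have : c ∈ PySem.Set.diff (PySem.Set.ofList ds) (PySem.Set.ofList allowed) := by
      rw [PySem.Set.mem_diff, PySem.Set.mem_ofList, PySem.Set.mem_ofList]
      refine ⟨hcm, fun hmem => ?_⟩
      have := List.all_eq_true.mp hcall c hmem
      simp at this
    rw [hdiff] at this
    simp at this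
  · intro h
    rcases List.exists_mem_of_ne_nil _ h with ⟨c, hc⟩
    rw [PySem.Set.mem_diff, PySem.Set.mem_ofList, PySem.Set.mem_ofList] at hc
    obtain ⟨hcm, hcn⟩ := hc
    have : c ∈ ds.filter (fun n => allowed.all (fun a => n != a)) := by
      rw [List.mem_filter]
      refine ⟨hcm, List.all_eq_true.mpr fun a ha => ?_⟩
      simp only [bne_iff_ne, ne_eq]
      intro h'
      subst h'
      exact hcn ha
    exact List.length_pos_iff.mpr (List.ne_nil_of_mem this)

-- ===== VERDICT (by name: the statement is the Claim_ definition above) =====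
theorem has_changes_outside_bounds_spec : Claim_equal_has_changes_outside_bounds := by
  intro lst allowed _
  unfold Spec_has_changes_outside_bounds
  exact has_changes_outside_bounds_eq lst allowed
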